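-- pv_equiv track=rewrite | github.com/shsimplon/PYTHON | inverser-trier-classer/len.py | word_max_min_sorted
-- ===== SOURCE A (Python) =====
-- def word_max_min(words):
--     # mettre dans un tableau
--     liste=words.split()
--     liste.sort()
--     #trier
--     max_word=(max(liste, key=len))
--     min_word=(min(liste, key=len))
--     return max_word,min_word
--
-- def word_max_min_sorted(sentence):
--     words=sentence.split()
--     max_word,min_word=word_max_min(sentence)
--     all_min_word=[word for word in words if len(word)==len(min_word)]
--     all_max_word=[word for word in words if len(word)==len(max_word)]
--     all_min_word.sort()
--     all_max_word.sort()
--     return all_min_word, all_max_word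
-- ===== SOURCE B (Python) =====
-- def word_max_min_sorted(sentence):
--     groups = {}
--     for w in sentence.split():
--         groups.setdefault(len(w), []).append(w)
--     mn = min(groups)
--     mx = max(groups)
--     return sorted(groups[mn]), sorted(groups[mx])
-- ===== Notes on version B (the rewrite author's own statement) =====
-- stated objective: alternative
-- what changed: One pass groups the words into a dict keyed by length, then min/max over the keys pick the two buckets to sort, replacing A's sort + min/max-by-len + two whole-list filter passes.
import Mathlib
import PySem

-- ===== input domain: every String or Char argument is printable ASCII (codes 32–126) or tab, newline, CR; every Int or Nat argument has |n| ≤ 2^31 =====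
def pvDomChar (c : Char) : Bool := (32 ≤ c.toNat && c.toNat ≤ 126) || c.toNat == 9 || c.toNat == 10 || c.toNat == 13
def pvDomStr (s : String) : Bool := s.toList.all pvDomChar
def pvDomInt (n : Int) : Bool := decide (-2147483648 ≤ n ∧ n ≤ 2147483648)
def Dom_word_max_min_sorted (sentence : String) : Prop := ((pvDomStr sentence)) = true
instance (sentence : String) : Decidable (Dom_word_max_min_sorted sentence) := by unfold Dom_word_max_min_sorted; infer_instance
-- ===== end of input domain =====

-- B replaces A's sort + min/max-by-len + two whole-list filters by a single grouping pass
-- into a length→words dict, min/max over the keys, and a sort of the two buckets.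

-- ===== PORT A =====
-- helper word_max_min: liste = words.split(); liste.sort(); (max(liste,key=len), min(liste,key=len))
-- returns none exactly where Python raises ValueError (empty sequence)
def word_max_min (words : String) : Option (String × String) :=
  let liste := PySem.List.sorted (PySem.Str.split₀ words) (fun x => x) false
  match PySem.List.max? liste (fun w => PySem.Str.len w),
        PySem.List.min? liste (fun w => PySem.Str.len w) with
  | some max_word, some min_word => some (max_word, min_word)
  | _, _ => none

def word_max_min_sorted (sentence : String) : List String × List String :=
  let words := PySem.Str.split₀ sentence
  match word_max_min sentence with
  | some (max_word, min_word) =>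
    let all_min_word := words.filter (fun w => PySem.Str.len w == PySem.Str.len min_word)
    let all_max_word := words.filter (fun w => PySem.Str.len w == PySem.Str.len max_word)
    (PySem.List.sorted all_min_word (fun x => x) false,
     PySem.List.sorted all_max_word (fun x => x) false)
  | none => ([], [])  -- unreachable under Pre_ (Python raises ValueError here)

-- ===== PORT B =====
def word_max_min_sorted_alt (sentence : String) : List String × List String :=
  let groups : PySem.Dict Int (List String) :=
    (PySem.Str.split₀ sentence).foldl
      (fun d w => d.modify (PySem.Str.len w) [] (· ++ [w])) PySem.Dict.empty
  match PySem.List.min? groups.keys (fun k => k),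
        PySem.List.max? groups.keys (fun k => k) with
  | some mn, some mx =>
    (PySem.List.sorted (groups.getD mn []) (fun x => x) false,
     PySem.List.sorted (groups.getD mx []) (fun x => x) false)
  | _, _ => ([], [])  -- unreachable under Pre_ (Python raises ValueError here)

-- ===== PRECONDITION & SPEC =====
-- Pre_ excludes exactly the sentences with no words (empty/whitespace-only), where A raises
-- ValueError from max() — and B raises ValueError from min() too.
def Pre_word_max_min_sorted (sentence : String) : Prop := PySem.Str.split₀ sentence ≠ []
instance (sentence : String) : Decidable (Pre_word_max_min_sorted sentence) := by
  unfold Pre_word_max_min_sorted; infer_instance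

def pvWitness_word_max_min_sorted : String := "the quick brown fox"

def Spec_word_max_min_sorted (sentence : String) (out : List String × List String) : Prop := out = word_max_min_sorted_alt sentence
instance (sentence : String) (out : List String × List String) : Decidable (Spec_word_max_min_sorted sentence out) := by unfold Spec_word_max_min_sorted; infer_instance

-- ===== CLAIM (what is proved, stated in full; the proofs are below) =====
def Claim_equal_word_max_min_sorted : Prop := ∀ (sentence : String), Dom_word_max_min_sorted sentence → Pre_word_max_min_sorted sentence → Spec_word_max_min_sorted sentence (word_max_min_sorted sentence)

-- ===== LEMMAS AND PROOFS =====

-- the grouping dict's bucket at key c is the filter of the words with that length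
theorem groups_getD (ws : List String) (c : Int) :
    (ws.foldl (fun d w => d.modify (PySem.Str.len w) [] (· ++ [w]))
      (PySem.Dict.empty : PySem.Dict Int (List String))).getD c []
      = ws.filter (fun w => PySem.Str.len w == c) := by
  have h : ws.foldl (fun d w => d.modify (PySem.Str.len w) [] (· ++ [w]))
      (PySem.Dict.empty : PySem.Dict Int (List String))
      = (ws.map (fun w => (PySem.Str.len w, w))).foldl
          (fun d p => d.modify p.1 [] (· ++ [p.2])) PySem.Dict.empty := by
    rw [List.foldl_map]
  rw [h, PySem.Dict.getD_foldl_modify_append]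
  simp [PySem.Dict.getD_empty, List.filter_map, Function.comp_def, List.map_map]

-- the grouping dict's keys are exactly the lengths occurring among the words
theorem mem_groups_keys (ws : List String) (c : Int) :
    c ∈ (ws.foldl (fun d w => d.modify (PySem.Str.len w) [] (· ++ [w]))
      (PySem.Dict.empty : PySem.Dict Int (List String))).keys ↔ c ∈ ws.map PySem.Str.len := by
  rw [PySem.Dict.keys_foldl_modify_key]
  simp [PySem.Set.mem_update, PySem.Dict.keys_empty]

-- ===== VERDICT (by name: the statement is the Claim_ definition above) =====
theorem word_max_min_sorted_spec : Claim_equal_word_max_min_sorted := by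
  intro s _ hpre
  unfold Pre_word_max_min_sorted at hpre
  unfold Spec_word_max_min_sorted word_max_min_sorted word_max_min word_max_min_sorted_alt
  set ws := PySem.Str.split₀ s with hws
  set liste := PySem.List.sorted ws (fun x => x) false with hliste
  have hlne : liste ≠ [] := by
    rw [hliste]; simpa [PySem.List.sorted_eq_nil_iff] using hpre
  set groups := ws.foldl (fun d w => d.modify (PySem.Str.len w) [] (· ++ [w]))
      (PySem.Dict.empty : PySem.Dict Int (List String)) with hgroups
  cases hmx : PySem.List.max? liste (fun w => PySem.Str.len w) with
  | none => exact absurd ((PySem.List.max?_eq_none_iff _ _).mp hmx) hlne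
  | some max_word =>
  cases hmn : PySem.List.min? liste (fun w => PySem.Str.len w) with
  | none => exact absurd ((PySem.List.min?_eq_none_iff _ _).mp hmn) hlne
  | some min_word =>
  have hkne : groups.keys ≠ [] := by
    obtain ⟨w, hw⟩ := List.exists_mem_of_ne_nil ws hpre
    have : PySem.Str.len w ∈ groups.keys := by
      rw [hgroups, mem_groups_keys]; exact List.mem_map_of_mem hw
    exact List.ne_nil_of_mem this
  cases hbmn : PySem.List.min? groups.keys (fun k => k) with
  | none => exact absurd ((PySem.List.min?_eq_none_iff _ _).mp hbmn) hkne
  | some mn =>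
  cases hbmx : PySem.List.max? groups.keys (fun k => k) with
  | none => exact absurd ((PySem.List.max?_eq_none_iff _ _).mp hbmx) hkne
  | some mx =>
  -- membership transfers
  have hmem : ∀ w : String, w ∈ liste ↔ w ∈ ws := by
    intro w; rw [hliste]; exact PySem.List.mem_sorted _ _ _ _
  have hkey : ∀ c : Int, c ∈ groups.keys ↔ c ∈ ws.map PySem.Str.len := by
    intro c; rw [hgroups]; exact mem_groups_keys ws c
  -- mn = len min_word
  have hmnw : min_word ∈ ws := (hmem _).mp (PySem.List.min?_mem hmn)
  have hmn1 : mn ≤ PySem.Str.len min_word :=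
    PySem.List.min?_isMin hbmn _ ((hkey _).mpr (List.mem_map_of_mem hmnw))
  obtain ⟨w0, hw0, hw0len⟩ := List.mem_map.mp ((hkey mn).mp (PySem.List.min?_mem hbmn))
  have hmn2 : PySem.Str.len min_word ≤ mn := by
    rw [← hw0len]; exact PySem.List.min?_isMin hmn _ ((hmem _).mpr hw0)
  have hmneq : PySem.Str.len min_word = mn := le_antisymm hmn2 hmn1
  -- mx = len max_word
  have hmxw : max_word ∈ ws := (hmem _).mp (PySem.List.max?_mem hmx)
  have hmx1 : PySem.Str.len max_word ≤ mx :=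
    PySem.List.max?_isMax hbmx _ ((hkey _).mpr (List.mem_map_of_mem hmxw))
  obtain ⟨w1, hw1, hw1len⟩ := List.mem_map.mp ((hkey mx).mp (PySem.List.max?_mem hbmx))
  have hmx2 : mx ≤ PySem.Str.len max_word := by
    rw [← hw1len]; exact PySem.List.max?_isMax hmx _ ((hmem _).mpr hw1)
  have hmxeq : PySem.Str.len max_word = mx := le_antisymm hmx1 hmx2
  have hg' : ∀ c, groups.getD c [] = ws.filter (fun w => PySem.Str.len w == c) := by
    intro c; rw [hgroups]; exact groups_getD ws c
  simp only [hmx, hmn, hbmn, hbmx, hg', hmneq, hmxeq]
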